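-- pv_equiv track=rewrite | github.com/Bill-Morgan/forest_fire | ffire.py | burn_cycle
-- ===== SOURCE A (Python) =====
-- def burn_cycle(bc_forest, width, height):
--     onfire = []
--     burn_count = 0
--     for x in range(width):
--         for y in range(height):
--             if bc_forest[x][y] == '@':
--                 onfire.append((x,y),)
--     for each_onfire in onfire:
--         x, y = each_onfire
--         bc_forest[x][y] = 'X'
--         if x > 0:
--             if bc_forest[x-1][y] == '#':
--                 bc_forest[x-1][y] = '@'
--                 burn_count += 1
--         if x < width -1:
--             if bc_forest[x+1][y] == '#':
--                 bc_forest[x+1][y] = '@'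
--                 burn_count += 1
--         if y > 0:
--             if bc_forest[x][y-1] == '#':
--                 bc_forest[x][y-1] = '@'
--                 burn_count += 1
--         if y < height -1:
--             if bc_forest[x][y+1] == '#':
--                 bc_forest[x][y+1] = '@'
--                 burn_count += 1
--     return (bc_forest, burn_count)
-- ===== SOURCE B (Python) =====
-- def burn_cycle(bc_forest, width, height):
--     # gather the snapshot of burning cells, then rebuild the grid pointwise
--     fires = {(x, y) for x in range(width) for y in range(height)
--              if bc_forest[x][y] == '@'}
--
--     def new_cell(x, y, c):
--         if x >= width or y >= height:
--             return c
--         if (x, y) in fires: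
--             return 'X'
--         if c == '#' and ((x - 1, y) in fires or (x + 1, y) in fires
--                          or (x, y - 1) in fires or (x, y + 1) in fires):
--             return '@'
--         return c
--
--     new_forest = [[new_cell(x, y, c) for y, c in enumerate(row)]
--                   for x, row in enumerate(bc_forest)]
--     burn_count = 0
--     for x in range(width):
--         for y in range(height):
--             if bc_forest[x][y] == '#' and ((x - 1, y) in fires or (x + 1, y) in fires
--                                            or (x, y - 1) in fires or (x, y + 1) in fires):
--                 burn_count += 1
--     return (new_forest, burn_count)
-- ===== Notes on version B (the rewrite author's own statement) =====
-- stated objective: alternative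
-- what changed: A scatters: it collects burning cells and then, for each, mutates the grid cell-by-cell igniting '#' neighbours; B gathers: it takes one snapshot set of burning cells and rebuilds the whole grid pointwise (fire -> 'X', tree with a burning neighbour in the snapshot -> '@'), counting ignitions in a separate pass over the window.
import Mathlib
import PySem

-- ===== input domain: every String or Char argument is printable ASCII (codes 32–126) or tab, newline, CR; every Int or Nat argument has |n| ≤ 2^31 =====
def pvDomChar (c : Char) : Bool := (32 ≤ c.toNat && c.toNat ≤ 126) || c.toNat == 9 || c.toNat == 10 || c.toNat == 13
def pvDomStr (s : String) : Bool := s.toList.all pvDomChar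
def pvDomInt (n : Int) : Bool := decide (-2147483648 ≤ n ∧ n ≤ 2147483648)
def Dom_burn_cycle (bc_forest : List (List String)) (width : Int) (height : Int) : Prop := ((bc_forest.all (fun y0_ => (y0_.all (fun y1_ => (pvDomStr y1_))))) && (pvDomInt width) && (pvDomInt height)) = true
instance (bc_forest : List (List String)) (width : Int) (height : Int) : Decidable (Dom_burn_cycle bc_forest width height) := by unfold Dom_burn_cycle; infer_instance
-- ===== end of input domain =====

-- B rebuilds the grid pointwise from a snapshot set of burning cells instead of scattering
-- writes from each fire (objective: alternative). A mutates bc_forest in place, B builds a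
-- new grid; the equivalence proved here is about the RETURN value only.

-- ===== PORT A =====
-- bc_forest[x][y]
def pvGet (g : List (List String)) (x y : Int) : String :=
  PySem.List.pyGetD (PySem.List.pyGetD g x []) y ""

-- bc_forest[x][y] = v
def pvSet (g : List (List String)) (x y : Int) (v : String) : List (List String) :=
  PySem.List.pySetD g x (PySem.List.pySetD (PySem.List.pyGetD g x []) y v)

-- one 'if <guard>: if bc_forest[nx][ny] == '#': ignite' block of A
def pvIgnite (st : List (List String) × Int) (guard : Bool) (x y : Int) :
    List (List String) × Int :=
  if guard then
    if pvGet st.1 x y == "#" then (pvSet st.1 x y "@", st.2 + 1) else st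
  else st

-- the body of A's 'for each_onfire in onfire' loop
def stepA (width height : Int) (st : List (List String) × Int) (xy : Int × Int) :
    List (List String) × Int :=
  let x := xy.1
  let y := xy.2
  let st0 := (pvSet st.1 x y "X", st.2)
  let st1 := pvIgnite st0 (decide (x > 0)) (x - 1) y
  let st2 := pvIgnite st1 (decide (x < width - 1)) (x + 1) y
  let st3 := pvIgnite st2 (decide (y > 0)) x (y - 1)
  pvIgnite st3 (decide (y < height - 1)) x (y + 1)

def burn_cycle (bc_forest : List (List String)) (width : Int) (height : Int) :
    List (List String) × Int :=
  let onfire := (PySem.List.pyRange 0 width 1).foldl (fun acc x =>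
    (PySem.List.pyRange 0 height 1).foldl (fun acc y =>
      if pvGet bc_forest x y == "@" then acc ++ [(x, y)] else acc) acc)
    ([] : List (Int × Int))
  onfire.foldl (stepA width height) (bc_forest, 0)

-- ===== PORT B =====
-- fires = {(x, y) for x in range(width) for y in range(height) if bc_forest[x][y] == '@'}
def altFires (g : List (List String)) (width height : Int) : PySem.Set (Int × Int) :=
  PySem.Set.ofList ((PySem.List.pyRange 0 width 1).flatMap (fun x =>
    ((PySem.List.pyRange 0 height 1).filter (fun y => pvGet g x y == "@")).map
      (fun y => (x, y))))

-- def new_cell(x, y, c)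
def altNewCell (width height : Int) (fires : PySem.Set (Int × Int)) (x y : Int)
    (c : String) : String :=
  if width ≤ x ∨ height ≤ y then c
  else if (x, y) ∈ fires then "X"
  else if c = "#" ∧ ((x - 1, y) ∈ fires ∨ (x + 1, y) ∈ fires ∨
                     (x, y - 1) ∈ fires ∨ (x, y + 1) ∈ fires) then "@"
  else c

def burn_cycle_alt (bc_forest : List (List String)) (width : Int) (height : Int) :
    List (List String) × Int :=
  let fires := altFires bc_forest width height
  let new_forest := (PySem.List.enumerate bc_forest).map (fun xr =>
    (PySem.List.enumerate xr.2).map (fun yc => altNewCell width height fires xr.1 yc.1 yc.2))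
  let burn_count := (PySem.List.pyRange 0 width 1).foldl (fun a x =>
    (PySem.List.pyRange 0 height 1).foldl (fun a y =>
      if pvGet bc_forest x y = "#" ∧ ((x - 1, y) ∈ fires ∨ (x + 1, y) ∈ fires ∨
          (x, y - 1) ∈ fires ∨ (x, y + 1) ∈ fires) then a + 1 else a) a) (0 : Int)
  (new_forest, burn_count)

-- ===== PRECONDITION & SPEC =====
-- Pre_ excludes exactly the inputs on which A raises IndexError: whenever both loop
-- ranges are non-empty, A reads bc_forest[x][y] for every x < width, y < height.
def Pre_burn_cycle (bc_forest : List (List String)) (width : Int) (height : Int) : Prop :=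
  (width ≤ 0 ∨ height ≤ 0) ∨
  (width ≤ (bc_forest.length : Int) ∧
    ∀ row ∈ bc_forest.take width.toNat, height ≤ (row.length : Int))
instance (bc_forest : List (List String)) (width : Int) (height : Int) :
    Decidable (Pre_burn_cycle bc_forest width height) := by
  unfold Pre_burn_cycle; infer_instance

def pvWitness_burn_cycle : List (List String) × Int × Int :=
  ([["@", "#"], ["#", "."]], 2, 2)

def Spec_burn_cycle (bc_forest : List (List String)) (width : Int) (height : Int) (out : List (List String) × Int) : Prop := out = burn_cycle_alt bc_forest width height
instance (bc_forest : List (List String)) (width : Int) (height : Int) (out : List (List String) × Int) : Decidable (Spec_burn_cycle bc_forest width height out) := by unfold Spec_burn_cycle; infer_instance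

-- ===== CLAIM (what is proved, stated in full; the proofs are below) =====
def Claim_equal_burn_cycle : Prop := ∀ (bc_forest : List (List String)) (width : Int) (height : Int), Dom_burn_cycle bc_forest width height → Pre_burn_cycle bc_forest width height → Spec_burn_cycle bc_forest width height (burn_cycle bc_forest width height)

-- ===== LEMMAS AND PROOFS =====

-- the snapshot list of burning cells, in A's (row-major) discovery order
def fireList (g : List (List String)) (w h : Int) : List (Int × Int) :=
  (PySem.List.pyRange 0 w 1).flatMap (fun x =>
    ((PySem.List.pyRange 0 h 1).filter (fun y => pvGet g x y == "@")).map (fun y => (x, y)))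

abbrev inWin (w h x y : Int) : Prop := 0 ≤ x ∧ x < w ∧ 0 ≤ y ∧ y < h

abbrev nbrIn (S : List (Int × Int)) (x y : Int) : Prop :=
  (x - 1, y) ∈ S ∨ (x + 1, y) ∈ S ∨ (x, y - 1) ∈ S ∨ (x, y + 1) ∈ S

-- the value of cell (x,y) after the fires in S have been processed
def cellVal (g : List (List String)) (w h : Int) (S : List (Int × Int)) (x y : Int) :
    String :=
  if (x, y) ∈ S then "X"
  else if inWin w h x y ∧ pvGet g x y = "#" ∧ nbrIn S x y then "@"
  else pvGet g x y

def rgrid (g : List (List String)) (w h : Int) (S : List (Int × Int)) :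
    List (List String) :=
  (PySem.List.enumerate g).map (fun xr =>
    (PySem.List.enumerate xr.2).map (fun yc => cellVal g w h S xr.1 yc.1))

def allPairs (w h : Int) : List (Int × Int) :=
  PySem.List.pyRange 0 w 1 ×ˢ PySem.List.pyRange 0 h 1

def cnt (g : List (List String)) (w h : Int) (S : List (Int × Int)) : Int :=
  ((allPairs w h).countP (fun p => decide (pvGet g p.1 p.2 = "#" ∧ nbrIn S p.1 p.2)) : Int)


theorem fireList_eq_filter (g : List (List String)) (w h : Int) :
    fireList g w h = (allPairs w h).filter (fun p => pvGet g p.1 p.2 == "@") := by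
  have hprod : allPairs w h =
      (PySem.List.pyRange 0 w 1).flatMap
        (fun a => (PySem.List.pyRange 0 h 1).map (Prod.mk a)) := rfl
  rw [fireList, hprod, List.filter_flatMap]
  apply List.flatMap_congr
  intro x _
  rw [List.filter_map]
  rfl

theorem mem_fireList {g : List (List String)} {w h x y : Int} :
    (x, y) ∈ fireList g w h ↔ inWin w h x y ∧ pvGet g x y = "@" := by
  rw [fireList_eq_filter]
  simp [List.mem_filter, allPairs, PySem.List.mem_pyRange_one, inWin]
  tauto

theorem nodup_allPairs (w h : Int) : (allPairs w h).Nodup :=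
  List.Nodup.product (PySem.List.nodup_pyRange_one 0 w) (PySem.List.nodup_pyRange_one 0 h)

theorem nodup_fireList (g : List (List String)) (w h : Int) :
    (fireList g w h).Nodup := by
  rw [fireList_eq_filter]; exact (nodup_allPairs w h).filter _

theorem mem_allPairs {w h : Int} (p : Int × Int) :
    p ∈ allPairs w h ↔ inWin w h p.1 p.2 := by
  obtain ⟨x, y⟩ := p
  simp [allPairs, PySem.List.mem_pyRange_one, inWin]
  tauto

-- A's first loop builds exactly fireList
theorem onfire_eq (g : List (List String)) (w h : Int) :
    (PySem.List.pyRange 0 w 1).foldl (fun acc x =>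
      (PySem.List.pyRange 0 h 1).foldl (fun acc y =>
        if pvGet g x y == "@" then acc ++ [(x, y)] else acc) acc)
      ([] : List (Int × Int)) = fireList g w h := by
  rw [PySem.List.foldl_congr_mem _ _
    (fun acc x => acc ++ ((PySem.List.pyRange 0 h 1).filter
      (fun y => pvGet g x y == "@")).map (fun y => (x, y))) _
    (fun acc x _ => PySem.List.foldl_append_if _ _ _ _)]
  rw [PySem.List.foldl_append_eq_flatMap]
  rfl

-- ===== grid shape machinery =====

def GShape (g0 g : List (List String)) : Prop :=
  g.length = g0.length ∧ ∀ i : Nat, (g.getD i []).length = (g0.getD i []).length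

theorem gshape_refl (g : List (List String)) : GShape g g := ⟨rfl, fun _ => rfl⟩

theorem pvGet_natCast (g : List (List String)) (x y : Nat) :
    pvGet g x y = (g.getD x []).getD y "" := by
  simp [pvGet, PySem.List.pyGetD_natCast]

theorem grid_ext {g0 g1 g2 : List (List String)}
    (h1 : GShape g0 g1) (h2 : GShape g0 g2)
    (hpt : ∀ x y : Nat, x < g0.length → y < (g0.getD x []).length →
      pvGet g1 x y = pvGet g2 x y) : g1 = g2 := by
  apply List.ext_getElem (h1.1.trans h2.1.symm)
  intro i hi1 hi2
  have hig : i < g0.length := h1.1 ▸ hi1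
  have hr1 : g1[i] = g1.getD i [] := (List.getD_eq_getElem g1 [] hi1).symm
  have hr2 : g2[i] = g2.getD i [] := (List.getD_eq_getElem g2 [] hi2).symm
  rw [hr1, hr2]
  apply List.ext_getElem ((h1.2 i).trans (h2.2 i).symm)
  intro j hj1 hj2
  have hjg : j < (g0.getD i []).length := (h1.2 i) ▸ hj1
  have e1 := pvGet_natCast g1 i j
  have e2 := pvGet_natCast g2 i j
  have := hpt i j hig hjg
  rw [e1, e2] at this
  rw [List.getD_eq_getElem _ "" hj1, List.getD_eq_getElem _ "" hj2] at this
  exact this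

-- shape and contents of an enumerate-map grid (rgrid and B's new_forest)
theorem gshape_emap (g : List (List String)) (f : Int → Int → String → String) :
    GShape g ((PySem.List.enumerate g).map (fun xr =>
      (PySem.List.enumerate xr.2).map (fun yc => f xr.1 yc.1 yc.2))) := by
  constructor
  · simp [PySem.List.length_enumerate]
  · intro i
    by_cases hi : i < g.length
    · have hi' : i < ((PySem.List.enumerate g).map (fun xr =>
        (PySem.List.enumerate xr.2).map (fun yc => f xr.1 yc.1 yc.2))).length := by
        simpa [PySem.List.length_enumerate] using hi
      rw [List.getD_eq_getElem _ [] hi', List.getD_eq_getElem _ [] hi]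
      simp [PySem.List.getElem_enumerate, PySem.List.length_enumerate]
    · have h1 : (g.getD i []) = [] := List.getD_eq_default _ _ (by omega)
      have h2 : (((PySem.List.enumerate g).map (fun xr =>
        (PySem.List.enumerate xr.2).map (fun yc => f xr.1 yc.1 yc.2))).getD i []) = [] :=
        List.getD_eq_default _ _ (by simp [PySem.List.length_enumerate]; omega)
      rw [h1, h2]

theorem pvGet_emap (g : List (List String)) (f : Int → Int → String → String)
    (x y : Nat) (hx : x < g.length) (hy : y < (g.getD x []).length) :
    pvGet ((PySem.List.enumerate g).map (fun xr =>
      (PySem.List.enumerate xr.2).map (fun yc => f xr.1 yc.1 yc.2))) x y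
      = f x y ((g.getD x []).getD y "") := by
  have hrow : (g.getD x []) = g[x] := List.getD_eq_getElem g [] hx
  have hy' : y < g[x].length := by rw [← hrow]; exact hy
  rw [pvGet_natCast]
  have hx1 : x < ((PySem.List.enumerate g).map (fun xr =>
      (PySem.List.enumerate xr.2).map (fun yc => f xr.1 yc.1 yc.2))).length := by
    simpa [PySem.List.length_enumerate] using hx
  rw [List.getD_eq_getElem _ [] hx1]
  simp only [List.getElem_map, PySem.List.getElem_enumerate]
  have hy1 : y < ((PySem.List.enumerate g[x]).map
      (fun yc => f ((0:Int) + x) yc.1 yc.2)).length := by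
    simpa [PySem.List.length_enumerate] using hy'
  rw [List.getD_eq_getElem _ "" hy1]
  simp only [List.getElem_map, PySem.List.getElem_enumerate]
  rw [hrow, List.getD_eq_getElem _ "" hy']
  norm_num

theorem gshape_rgrid (g : List (List String)) (w h : Int) (S : List (Int × Int)) :
    GShape g (rgrid g w h S) :=
  gshape_emap g (fun x y _ => cellVal g w h S x y)

theorem pvGet_rgrid (g : List (List String)) (w h : Int) (S : List (Int × Int))
    (x y : Nat) (hx : x < g.length) (hy : y < (g.getD x []).length) :
    pvGet (rgrid g w h S) x y = cellVal g w h S x y :=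
  pvGet_emap g (fun x y _ => cellVal g w h S x y) x y hx hy

theorem pvGet_rgrid' (g : List (List String)) (w h : Int) (S : List (Int × Int))
    {x y : Int} (hx0 : 0 ≤ x) (hx : x < (g.length : Int)) (hy0 : 0 ≤ y)
    (hy : y < ((g.getD x.toNat []).length : Int)) :
    pvGet (rgrid g w h S) x y = cellVal g w h S x y := by
  have ex : x = ((x.toNat : Nat) : Int) := by omega
  have ey : y = ((y.toNat : Nat) : Int) := by omega
  rw [ex, ey]
  exact pvGet_rgrid g w h S x.toNat y.toNat (by omega) (by omega)

-- ===== pvSet lemmas =====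

theorem pvGet_pvSet (g : List (List String)) (a b : Int) (v : String) (x y : Int)
    (ha0 : 0 ≤ a) (ha : a < (g.length : Int)) (hb0 : 0 ≤ b)
    (hb : b < ((PySem.List.pyGetD g a []).length : Int)) (hx0 : 0 ≤ x) (hy0 : 0 ≤ y) :
    pvGet (pvSet g a b v) x y = if x = a ∧ y = b then v else pvGet g x y := by
  have ea : a = ((a.toNat : Nat) : Int) := by omega
  have eb : b = ((b.toNat : Nat) : Int) := by omega
  have ex : x = ((x.toNat : Nat) : Int) := by omega
  have ey : y = ((y.toNat : Nat) : Int) := by omega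
  rw [pvGet, pvSet, ea, ex]
  rw [PySem.List.pyGetD_pySetD_natCast g a.toNat x.toNat _ [] (by omega)]
  by_cases hxa : x.toNat = a.toNat
  · rw [if_pos hxa]
    rw [eb, ey, PySem.List.pyGetD_pySetD_natCast _ b.toNat y.toNat v "" (by rw [← ea]; omega)]
    by_cases hyb : y.toNat = b.toNat
    · rw [if_pos hyb, if_pos (by omega)]
    · rw [if_neg hyb, if_neg (by omega), pvGet, ← ea, ex]
      congr 1
      rw [ea]
      congr 1
      omega
  · rw [if_neg hxa, if_neg (by omega), pvGet, ex]

theorem gshape_pvSet {g0 g : List (List String)} (hs : GShape g0 g) (a b : Int)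
    (v : String) (ha0 : 0 ≤ a) (ha : a < (g.length : Int)) :
    GShape g0 (pvSet g a b v) := by
  refine ⟨?_, ?_⟩
  · rw [pvSet, PySem.List.length_pySetD]; exact hs.1
  · intro i
    have ea : a = ((a.toNat : Nat) : Int) := by omega
    have h1 : PySem.List.pyGetD (pvSet g a b v) (i : Int) [] =
        if i = a.toNat then PySem.List.pySetD (PySem.List.pyGetD g a []) b v
        else PySem.List.pyGetD g (i : Int) [] := by
      rw [pvSet, ea, PySem.List.pyGetD_pySetD_natCast g a.toNat i _ [] (by omega)]
      simp [← ea]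
    have h2 : (pvSet g a b v).getD i [] = PySem.List.pyGetD (pvSet g a b v) (i : Int) [] :=
      (PySem.List.pyGetD_natCast _ i []).symm
    have h3 : g.getD i [] = PySem.List.pyGetD g (i : Int) [] :=
      (PySem.List.pyGetD_natCast _ i []).symm
    rw [h2, h1]
    by_cases hia : i = a.toNat
    · rw [if_pos hia, PySem.List.length_pySetD, ← hs.2 i, h3, hia, ← ea]
    · rw [if_neg hia, ← h3, hs.2 i]

-- ===== cellVal facts =====

theorem cellVal_nil (g : List (List String)) (w h x y : Int) :
    cellVal g w h [] x y = pvGet g x y := by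
  simp [cellVal, nbrIn]

theorem rgrid_nil (g : List (List String)) (w h : Int) : rgrid g w h [] = g := by
  apply grid_ext (gshape_rgrid g w h []) (gshape_refl g)
  intro x y hx hy
  rw [pvGet_rgrid g w h [] x y hx hy, cellVal_nil, pvGet_natCast]

theorem cnt_nil (g : List (List String)) (w h : Int) : cnt g w h [] = 0 := by
  simp [cnt, nbrIn]

theorem cellVal_eq_hash {g : List (List String)} {w h : Int} {S : List (Int × Int)}
    (hS : ∀ p ∈ S, pvGet g p.1 p.2 = "@") {x y : Int} (hwin : inWin w h x y) :
    cellVal g w h S x y = "#" ↔ pvGet g x y = "#" ∧ ¬ nbrIn S x y := by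
  unfold cellVal
  split_ifs with h1 h2
  · have := hS _ h1
    simp only at this
    constructor
    · intro hX; exact absurd hX (by decide)
    · rintro ⟨hh, -⟩; rw [this] at hh; exact absurd hh (by decide)
  · constructor
    · intro hA; exact absurd hA (by decide)
    · rintro ⟨-, hn⟩; exact absurd h2.2.2 hn
  · constructor
    · intro hh
      refine ⟨hh, fun hn => h2 ⟨hwin, hh, hn⟩⟩
    · exact fun h => h.1


-- ===== counting machinery =====

theorem countP_sub {alpha : Type} (l : List alpha) (p q : alpha → Bool)
    (h : ∀ x ∈ l, p x = true → q x = true) :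
    l.countP q = l.countP p + l.countP (fun x => q x && !p x) := by
  induction l with
  | nil => simp
  | cons a t ih =>
    simp only [List.countP_cons]
    rw [ih (fun x hx => h x (List.mem_cons_of_mem a hx))]
    have := h a List.mem_cons_self
    by_cases hp : p a = true <;> by_cases hq : q a = true <;> simp_all <;> omega

theorem countP_support {alpha : Type} [DecidableEq alpha] (l ns : List alpha)
    (r : alpha → Bool) (hl : l.Nodup) (hns : ns.Nodup)
    (hr : ∀ x ∈ l, r x = true → x ∈ ns) :
    l.countP r = ns.countP (fun n => r n && l.contains n) := by
  rw [List.countP_eq_length_filter, List.countP_eq_length_filter]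
  rw [← List.toFinset_card_of_nodup (hl.filter r),
      ← List.toFinset_card_of_nodup (hns.filter _)]
  congr 1
  apply Finset.ext
  intro z
  simp only [List.mem_toFinset, List.mem_filter, Bool.and_eq_true, List.contains_iff_mem]
  constructor
  · rintro ⟨hzl, hrz⟩; exact ⟨hr z hzl hrz, hrz, hzl⟩
  · rintro ⟨_, hrz, hzl⟩; exact ⟨hzl, hrz⟩

theorem countP_product {alpha beta : Type} (l1 : List alpha) (l2 : List beta)
    (r : alpha × beta → Bool) :
    (l1 ×ˢ l2).countP r = (l1.map (fun a => l2.countP (fun b => r (a, b)))).sum := by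
  induction l1 with
  | nil => rfl
  | cons a t ih =>
    have hcons : ((a :: t) ×ˢ l2) = l2.map (Prod.mk a) ++ t ×ˢ l2 := rfl
    rw [hcons, List.countP_append, List.countP_map, ih]
    rfl

-- the per-neighbour ignition condition (read against the snapshot S)
abbrev qIg (g : List (List String)) (S : List (Int × Int)) (guard : Prop)
    (x y : Int) : Prop :=
  guard ∧ pvGet g x y = "#" ∧ ¬ nbrIn S x y

theorem rowlen_int (g : List (List String)) (x : Int) (h0 : 0 ≤ x) :
    ((g.getD x.toNat []).length : Int) = ((PySem.List.pyGetD g x []).length : Int) := by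
  have e : x = ((x.toNat : Nat) : Int) := by omega
  conv_rhs => rw [e, PySem.List.pyGetD_natCast]

theorem nbrIn_mono (S : List (Int × Int)) (T : List (Int × Int)) (x y : Int)
    (hsub : ∀ p ∈ S, p ∈ T) (hn : nbrIn S x y) : nbrIn T x y := by
  unfold nbrIn at hn ⊢
  rcases hn with hc | hc | hc | hc
  · exact Or.inl (hsub _ hc)
  · exact Or.inr (Or.inl (hsub _ hc))
  · exact Or.inr (Or.inr (Or.inl (hsub _ hc)))
  · exact Or.inr (Or.inr (Or.inr (hsub _ hc)))

theorem cnt_append (g : List (List String)) (w h : Int) (S : List (Int × Int))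
    (a b : Int) (hf : (a, b) ∈ fireList g w h)
    (_hS : ∀ p ∈ S, p ∈ fireList g w h) :
    cnt g w h (S ++ [(a, b)]) = cnt g w h S
      + ((if qIg g S (0 < a) (a - 1) b then 1 else 0)
        + (if qIg g S (a < w - 1) (a + 1) b then 1 else 0)
        + (if qIg g S (0 < b) a (b - 1) then 1 else 0)
        + (if qIg g S (b < h - 1) a (b + 1) then 1 else 0) : Int) := by
  obtain ⟨⟨ha0, haw, hb0, hbh⟩, hfire⟩ := mem_fireList.1 hf
  unfold cnt
  have hmono : ∀ pt ∈ allPairs w h,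
      (fun pt : Int × Int => decide (pvGet g pt.1 pt.2 = "#" ∧ nbrIn S pt.1 pt.2)) pt = true →
      (fun pt : Int × Int => decide (pvGet g pt.1 pt.2 = "#" ∧ nbrIn (S ++ [(a, b)]) pt.1 pt.2)) pt = true := by
    intro pt _ hpt
    simp only [decide_eq_true_eq] at hpt ⊢
    exact ⟨hpt.1, nbrIn_mono S _ _ _ (fun p hp => List.mem_append_left _ hp) hpt.2⟩
  rw [countP_sub (allPairs w h) _ _ hmono]
  have hsupp : ∀ pt ∈ allPairs w h,
      ((fun pt : Int × Int => decide (pvGet g pt.1 pt.2 = "#" ∧ nbrIn (S ++ [(a, b)]) pt.1 pt.2)) pt &&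
       !(fun pt : Int × Int => decide (pvGet g pt.1 pt.2 = "#" ∧ nbrIn S pt.1 pt.2)) pt) = true →
      pt ∈ [(a - 1, b), (a + 1, b), (a, b - 1), (a, b + 1)] := by
    intro pt _ hqt
    obtain ⟨px, py⟩ := pt
    simp only [Bool.and_eq_true, Bool.not_eq_true', decide_eq_true_eq,
      decide_eq_false_iff_not] at hqt
    obtain ⟨⟨hh, hnn⟩, hnp⟩ := hqt
    have hnS : ¬ nbrIn S px py := fun hn => hnp ⟨hh, hn⟩
    unfold nbrIn at hnn hnS
    push Not at hnS
    simp only [List.mem_cons, List.not_mem_nil, or_false, Prod.mk.injEq]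
    rcases hnn with hc | hc | hc | hc <;>
      rcases List.mem_append.1 hc with hc' | hc' <;>
      first
        | (exfalso; revert hc'; simp only [imp_false]; tauto)
        | (rw [List.mem_singleton, Prod.mk.injEq] at hc'; omega)
  rw [countP_support (allPairs w h) _ _ (nodup_allPairs w h)
    (by simp [Prod.ext_iff]; omega) hsupp]
  simp only [List.countP_cons, List.countP_nil, Bool.and_eq_true, Bool.not_eq_true',
    decide_eq_true_eq, decide_eq_false_iff_not, List.contains_iff_mem, mem_allPairs]
  have nb1 : nbrIn (S ++ [(a, b)]) (a - 1) b := Or.inr (Or.inl (List.mem_append_right _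
    (List.mem_singleton.2 (by rw [Prod.mk.injEq]; constructor <;> omega))))
  have nb2 : nbrIn (S ++ [(a, b)]) (a + 1) b := Or.inl (List.mem_append_right _
    (List.mem_singleton.2 (by rw [Prod.mk.injEq]; constructor <;> omega)))
  have nb3 : nbrIn (S ++ [(a, b)]) a (b - 1) := Or.inr (Or.inr (Or.inr (List.mem_append_right _
    (List.mem_singleton.2 (by rw [Prod.mk.injEq]; constructor <;> omega)))))
  have nb4 : nbrIn (S ++ [(a, b)]) a (b + 1) := Or.inr (Or.inr (Or.inl (List.mem_append_right _
    (List.mem_singleton.2 (by rw [Prod.mk.injEq]; constructor <;> omega)))))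
  by_cases hq1 : qIg g S (0 < a) (a - 1) b
  all_goals first
    | rw [if_pos (show ((pvGet g (a - 1) b = "#" ∧ nbrIn (S ++ [(a, b)]) (a - 1) b) ∧
        ¬(pvGet g (a - 1) b = "#" ∧ nbrIn S (a - 1) b)) ∧ inWin w h (a - 1) b from
        ⟨⟨⟨hq1.2.1, nb1⟩, fun hc => hq1.2.2 hc.2⟩,
          by have := hq1.1; exact ⟨by omega, by omega, hb0, hbh⟩⟩), if_pos hq1]
    | rw [if_neg (show ¬ (((pvGet g (a - 1) b = "#" ∧ nbrIn (S ++ [(a, b)]) (a - 1) b) ∧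
        ¬(pvGet g (a - 1) b = "#" ∧ nbrIn S (a - 1) b)) ∧ inWin w h (a - 1) b) by
        rintro ⟨⟨⟨hh, -⟩, hnp⟩, hwin⟩
        exact hq1 ⟨by rcases hwin with ⟨h1, -⟩; omega, hh, fun hn => hnp ⟨hh, hn⟩⟩), if_neg hq1]
  all_goals by_cases hq2 : qIg g S (a < w - 1) (a + 1) b
  all_goals first
    | rw [if_pos (show ((pvGet g (a + 1) b = "#" ∧ nbrIn (S ++ [(a, b)]) (a + 1) b) ∧
          ¬(pvGet g (a + 1) b = "#" ∧ nbrIn S (a + 1) b)) ∧ inWin w h (a + 1) b from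
          ⟨⟨⟨hq2.2.1, nb2⟩, fun hc => hq2.2.2 hc.2⟩,
            by have := hq2.1; exact ⟨by omega, by omega, hb0, hbh⟩⟩), if_pos hq2]
    | rw [if_neg (show ¬ (((pvGet g (a + 1) b = "#" ∧ nbrIn (S ++ [(a, b)]) (a + 1) b) ∧
          ¬(pvGet g (a + 1) b = "#" ∧ nbrIn S (a + 1) b)) ∧ inWin w h (a + 1) b) by
          rintro ⟨⟨⟨hh, -⟩, hnp⟩, hwin⟩
          exact hq2 ⟨by rcases hwin with ⟨-, h2, -⟩; omega, hh, fun hn => hnp ⟨hh, hn⟩⟩), if_neg hq2]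
  all_goals by_cases hq3 : qIg g S (0 < b) a (b - 1)
  all_goals first
    | rw [if_pos (show ((pvGet g a (b - 1) = "#" ∧ nbrIn (S ++ [(a, b)]) a (b - 1)) ∧
          ¬(pvGet g a (b - 1) = "#" ∧ nbrIn S a (b - 1))) ∧ inWin w h a (b - 1) from
          ⟨⟨⟨hq3.2.1, nb3⟩, fun hc => hq3.2.2 hc.2⟩,
            by have := hq3.1; exact ⟨ha0, haw, by omega, by omega⟩⟩), if_pos hq3]
    | rw [if_neg (show ¬ (((pvGet g a (b - 1) = "#" ∧ nbrIn (S ++ [(a, b)]) a (b - 1)) ∧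
          ¬(pvGet g a (b - 1) = "#" ∧ nbrIn S a (b - 1))) ∧ inWin w h a (b - 1)) by
          rintro ⟨⟨⟨hh, -⟩, hnp⟩, hwin⟩
          exact hq3 ⟨by rcases hwin with ⟨-, -, h3, -⟩; omega, hh, fun hn => hnp ⟨hh, hn⟩⟩), if_neg hq3]
  all_goals by_cases hq4 : qIg g S (b < h - 1) a (b + 1)
  all_goals first
    | rw [if_pos (show ((pvGet g a (b + 1) = "#" ∧ nbrIn (S ++ [(a, b)]) a (b + 1)) ∧
          ¬(pvGet g a (b + 1) = "#" ∧ nbrIn S a (b + 1))) ∧ inWin w h a (b + 1) from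
          ⟨⟨⟨hq4.2.1, nb4⟩, fun hc => hq4.2.2 hc.2⟩,
            by have := hq4.1; exact ⟨ha0, haw, by omega, by omega⟩⟩), if_pos hq4]
    | rw [if_neg (show ¬ (((pvGet g a (b + 1) = "#" ∧ nbrIn (S ++ [(a, b)]) a (b + 1)) ∧
          ¬(pvGet g a (b + 1) = "#" ∧ nbrIn S a (b + 1))) ∧ inWin w h a (b + 1)) by
          rintro ⟨⟨⟨hh, -⟩, hnp⟩, hwin⟩
          exact hq4 ⟨by rcases hwin with ⟨-, -, -, h4⟩; omega, hh, fun hn => hnp ⟨hh, hn⟩⟩), if_neg hq4]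
  all_goals push_cast
  all_goals ring

-- ===== the effect of processing one fire =====

theorem cellVal_append_ign (g : List (List String)) (w h : Int)
    (S : List (Int × Int)) (a b x y : Int)
    (hSat : ∀ p ∈ S, pvGet g p.1 p.2 = "@") (hnf : ¬ (x = a ∧ y = b))
    (hwin : inWin w h x y) (hh : pvGet g x y = "#")
    (hadj : (x - 1, y) = (a, b) ∨ (x + 1, y) = (a, b) ∨
            (x, y - 1) = (a, b) ∨ (x, y + 1) = (a, b)) :
    cellVal g w h (S ++ [(a, b)]) x y = "@" := by
  unfold cellVal
  have h1 : ¬ ((x, y) ∈ S ++ [(a, b)]) := by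
    intro hm
    rcases List.mem_append.1 hm with hm | hm
    · exact absurd (hh ▸ hSat _ hm) (by decide)
    · rw [List.mem_singleton, Prod.mk.injEq] at hm
      exact hnf hm
  rw [if_neg h1, if_pos ⟨hwin, hh, by
    unfold nbrIn
    rcases hadj with hc | hc | hc | hc
    · exact Or.inl (List.mem_append_right _ (by rw [hc]; exact List.mem_singleton.2 rfl))
    · exact Or.inr (Or.inl (List.mem_append_right _ (by rw [hc]; exact List.mem_singleton.2 rfl)))
    · exact Or.inr (Or.inr (Or.inl (List.mem_append_right _ (by rw [hc]; exact List.mem_singleton.2 rfl))))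
    · exact Or.inr (Or.inr (Or.inr (List.mem_append_right _ (by rw [hc]; exact List.mem_singleton.2 rfl))))⟩]

theorem cellVal_append_inv (g : List (List String)) (w h : Int)
    (S : List (Int × Int)) (a b x y : Int)
    (_hSat : ∀ p ∈ S, pvGet g p.1 p.2 = "@") (hnf : ¬ (x = a ∧ y = b))
    (hq : inWin w h x y → pvGet g x y = "#" →
      ((x - 1, y) = (a, b) ∨ (x + 1, y) = (a, b) ∨
       (x, y - 1) = (a, b) ∨ (x, y + 1) = (a, b)) → nbrIn S x y) :
    cellVal g w h (S ++ [(a, b)]) x y = cellVal g w h S x y := by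
  unfold cellVal
  have hmem : ((x, y) ∈ S ++ [(a, b)]) ↔ (x, y) ∈ S := by
    rw [List.mem_append, List.mem_singleton, Prod.mk.injEq]
    exact or_iff_left hnf
  by_cases hs : (x, y) ∈ S
  · rw [if_pos (hmem.2 hs), if_pos hs]
  · rw [if_neg (fun hc => hs (hmem.1 hc))]
    rw [if_neg hs]
    have hiff : (inWin w h x y ∧ pvGet g x y = "#" ∧ nbrIn (S ++ [(a, b)]) x y) ↔
        (inWin w h x y ∧ pvGet g x y = "#" ∧ nbrIn S x y) := by
      constructor
      · rintro ⟨hw1, hh1, hn1⟩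
        refine ⟨hw1, hh1, ?_⟩
        unfold nbrIn at hn1 ⊢
        have hsplit : ∀ p : Int × Int, p ∈ S ++ [(a, b)] → p ∈ S ∨ p = (a, b) := by
          intro p hp
          rcases List.mem_append.1 hp with hp | hp
          · exact Or.inl hp
          · exact Or.inr (List.mem_singleton.1 hp)
        rcases hn1 with hc | hc | hc | hc
        · rcases hsplit _ hc with hc' | hc'
          · exact Or.inl hc'
          · exact hq hw1 hh1 (Or.inl hc')
        · rcases hsplit _ hc with hc' | hc'
          · exact Or.inr (Or.inl hc')
          · exact hq hw1 hh1 (Or.inr (Or.inl hc'))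
        · rcases hsplit _ hc with hc' | hc'
          · exact Or.inr (Or.inr (Or.inl hc'))
          · exact hq hw1 hh1 (Or.inr (Or.inr (Or.inl hc')))
        · rcases hsplit _ hc with hc' | hc'
          · exact Or.inr (Or.inr (Or.inr hc'))
          · exact hq hw1 hh1 (Or.inr (Or.inr (Or.inr hc')))
      · rintro ⟨hw1, hh1, hn1⟩
        refine ⟨hw1, hh1, ?_⟩
        unfold nbrIn at hn1 ⊢
        rcases hn1 with hc | hc | hc | hc
        · exact Or.inl (List.mem_append_left _ hc)
        · exact Or.inr (Or.inl (List.mem_append_left _ hc))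
        · exact Or.inr (Or.inr (Or.inl (List.mem_append_left _ hc)))
        · exact Or.inr (Or.inr (Or.inr (List.mem_append_left _ hc)))
    rw [if_congr hiff rfl rfl]

theorem cellVal_append (g : List (List String)) (w h : Int) (S : List (Int × Int))
    (a b : Int) (hf : (a, b) ∈ fireList g w h)
    (hS : ∀ p ∈ S, p ∈ fireList g w h) (x y : Int) :
    cellVal g w h (S ++ [(a, b)]) x y =
      if qIg g S (b < h - 1) a (b + 1) ∧ (x = a ∧ y = b + 1) then "@"
      else if qIg g S (0 < b) a (b - 1) ∧ (x = a ∧ y = b - 1) then "@"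
      else if qIg g S (a < w - 1) (a + 1) b ∧ (x = a + 1 ∧ y = b) then "@"
      else if qIg g S (0 < a) (a - 1) b ∧ (x = a - 1 ∧ y = b) then "@"
      else if x = a ∧ y = b then "X"
      else cellVal g w h S x y := by
  obtain ⟨⟨ha0, haw, hb0, hbh⟩, hfire⟩ := mem_fireList.1 hf
  have hSat : ∀ p ∈ S, pvGet g p.1 p.2 = "@" := by
    intro p hp
    obtain ⟨px, py⟩ := p
    exact (mem_fireList.1 (hS _ hp)).2
  by_cases e0 : x = a ∧ y = b
  · obtain ⟨ex, ey⟩ := e0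
    rw [if_neg (by rintro ⟨-, -, hyy⟩; omega), if_neg (by rintro ⟨-, -, hyy⟩; omega),
        if_neg (by rintro ⟨-, hxx, -⟩; omega), if_neg (by rintro ⟨-, hxx, -⟩; omega),
        if_pos ⟨ex, ey⟩]
    unfold cellVal
    rw [if_pos (List.mem_append_right _ (List.mem_singleton.2
      (by rw [Prod.mk.injEq]; exact ⟨ex, ey⟩)))]
  · by_cases e4 : x = a ∧ y = b + 1
    · obtain ⟨ex, ey⟩ := e4
      by_cases hq : qIg g S (b < h - 1) a (b + 1)
      · rw [if_pos ⟨hq, ex, ey⟩]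
        exact cellVal_append_ign g w h S a b x y hSat e0
          ⟨by omega, by omega, by omega, by have := hq.1; omega⟩
          (by rw [ex, ey]; exact hq.2.1)
          (Or.inr (Or.inr (Or.inl (by rw [Prod.mk.injEq]; constructor <;> omega))))
      · rw [if_neg (fun hc => hq hc.1), if_neg (by rintro ⟨-, -, hyy⟩; omega),
            if_neg (by rintro ⟨-, hxx, -⟩; omega), if_neg (by rintro ⟨-, hxx, -⟩; omega),
            if_neg e0]
        apply cellVal_append_inv g w h S a b x y hSat e0
        intro hwin hh hadj
        by_contra hnin
        refine hq ⟨by rcases hwin with ⟨-, -, -, hyh⟩; omega,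
          by rw [← ex, ← ey]; exact hh, by rw [← ex, ← ey]; exact hnin⟩
    · by_cases e3 : x = a ∧ y = b - 1
      · obtain ⟨ex, ey⟩ := e3
        by_cases hq : qIg g S (0 < b) a (b - 1)
        · rw [if_neg (by rintro ⟨-, -, hyy⟩; omega), if_pos ⟨hq, ex, ey⟩]
          exact cellVal_append_ign g w h S a b x y hSat e0
            ⟨by omega, by omega, by have := hq.1; omega, by omega⟩
            (by rw [ex, ey]; exact hq.2.1)
            (Or.inr (Or.inr (Or.inr (by rw [Prod.mk.injEq]; constructor <;> omega))))
        · rw [if_neg (by rintro ⟨-, -, hyy⟩; omega), if_neg (fun hc => hq hc.1),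
              if_neg (by rintro ⟨-, hxx, -⟩; omega), if_neg (by rintro ⟨-, hxx, -⟩; omega),
              if_neg e0]
          apply cellVal_append_inv g w h S a b x y hSat e0
          intro hwin hh hadj
          by_contra hnin
          refine hq ⟨by rcases hwin with ⟨-, -, hy0, -⟩; omega,
            by rw [← ex, ← ey]; exact hh, by rw [← ex, ← ey]; exact hnin⟩
      · by_cases e2 : x = a + 1 ∧ y = b
        · obtain ⟨ex, ey⟩ := e2
          by_cases hq : qIg g S (a < w - 1) (a + 1) b
          · rw [if_neg (by rintro ⟨-, -, hyy⟩; omega), if_neg (by rintro ⟨-, -, hyy⟩; omega),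
                if_pos ⟨hq, ex, ey⟩]
            exact cellVal_append_ign g w h S a b x y hSat e0
              ⟨by omega, by have := hq.1; omega, by omega, by omega⟩
              (by rw [ex, ey]; exact hq.2.1)
              (Or.inl (by rw [Prod.mk.injEq]; constructor <;> omega))
          · rw [if_neg (by rintro ⟨-, -, hyy⟩; omega), if_neg (by rintro ⟨-, -, hyy⟩; omega),
                if_neg (fun hc => hq hc.1), if_neg (by rintro ⟨-, hxx, -⟩; omega),
                if_neg e0]
            apply cellVal_append_inv g w h S a b x y hSat e0
            intro hwin hh hadj
            by_contra hnin
            refine hq ⟨by rcases hwin with ⟨-, hxw, -, -⟩; omega,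
              by rw [← ex, ← ey]; exact hh, by rw [← ex, ← ey]; exact hnin⟩
        · by_cases e1 : x = a - 1 ∧ y = b
          · obtain ⟨ex, ey⟩ := e1
            by_cases hq : qIg g S (0 < a) (a - 1) b
            · rw [if_neg (by rintro ⟨-, -, hyy⟩; omega), if_neg (by rintro ⟨-, -, hyy⟩; omega),
                  if_neg (by rintro ⟨-, hxx, -⟩; omega), if_pos ⟨hq, ex, ey⟩]
              exact cellVal_append_ign g w h S a b x y hSat e0
                ⟨by have := hq.1; omega, by omega, by omega, by omega⟩
                (by rw [ex, ey]; exact hq.2.1)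
                (Or.inr (Or.inl (by rw [Prod.mk.injEq]; constructor <;> omega)))
            · rw [if_neg (by rintro ⟨-, -, hyy⟩; omega), if_neg (by rintro ⟨-, -, hyy⟩; omega),
                  if_neg (by rintro ⟨-, hxx, -⟩; omega), if_neg (fun hc => hq hc.1),
                  if_neg e0]
              apply cellVal_append_inv g w h S a b x y hSat e0
              intro hwin hh hadj
              by_contra hnin
              refine hq ⟨by rcases hwin with ⟨hx0, -, -, -⟩; omega,
                by rw [← ex, ← ey]; exact hh, by rw [← ex, ← ey]; exact hnin⟩
          · rw [if_neg (by rintro ⟨-, hc⟩; exact e4 hc),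
                if_neg (by rintro ⟨-, hc⟩; exact e3 hc),
                if_neg (by rintro ⟨-, hc⟩; exact e2 hc),
                if_neg (by rintro ⟨-, hc⟩; exact e1 hc),
                if_neg e0]
            apply cellVal_append_inv g w h S a b x y hSat e0
            intro hwin hh hadj
            exfalso
            rcases hadj with hc | hc | hc | hc <;> rw [Prod.mk.injEq] at hc <;>
              exact e2 (by omega)

def applyIf (q : Prop) [Decidable q] (G : List (List String)) (x y : Int) :
    List (List String) :=
  if q then pvSet G x y "@" else G

theorem rowlen_shape {g G : List (List String)} (hs : GShape g G) (cx : Int)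
    (h0 : 0 ≤ cx) :
    ((PySem.List.pyGetD G cx []).length : Int) = ((PySem.List.pyGetD g cx []).length : Int) := by
  have e : cx = ((cx.toNat : Nat) : Int) := by omega
  rw [e, PySem.List.pyGetD_natCast, PySem.List.pyGetD_natCast]
  exact_mod_cast congrArg (fun n : Nat => (n : Int)) (hs.2 cx.toNat)

theorem gshape_applyIf {g G : List (List String)} (hs : GShape g G) (q : Prop)
    [Decidable q] (cx cy : Int) (hq : q → 0 ≤ cx ∧ cx < (G.length : Int)) :
    GShape g (applyIf q G cx cy) := by
  unfold applyIf
  split_ifs with hqt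
  · exact gshape_pvSet hs cx cy "@" (hq hqt).1 (hq hqt).2
  · exact hs

theorem pvGet_applyIf (q : Prop) [Decidable q] (G : List (List String))
    (cx cy x y : Int)
    (hq : q → 0 ≤ cx ∧ cx < (G.length : Int) ∧ 0 ≤ cy ∧
      cy < ((PySem.List.pyGetD G cx []).length : Int))
    (hx0 : 0 ≤ x) (hy0 : 0 ≤ y) :
    pvGet (applyIf q G cx cy) x y = if q ∧ (x = cx ∧ y = cy) then "@" else pvGet G x y := by
  unfold applyIf
  split_ifs with h1 h2 h2
  · rw [pvGet_pvSet G cx cy "@" x y (hq h1).1 (hq h1).2.1 (hq h1).2.2.1 (hq h1).2.2.2 hx0 hy0,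
        if_pos h2.2]
  · rw [pvGet_pvSet G cx cy "@" x y (hq h1).1 (hq h1).2.1 (hq h1).2.2.1 (hq h1).2.2.2 hx0 hy0,
        if_neg (fun hc => h2 ⟨h1, hc⟩)]
  · exact absurd h2.1 h1
  · rfl

theorem grid_final (g : List (List String)) (w h : Int) (S : List (Int × Int))
    (a b : Int) (hw : w ≤ (g.length : Int))
    (hrow : ∀ x : Int, 0 ≤ x → x < w → h ≤ ((PySem.List.pyGetD g x []).length : Int))
    (hf : (a, b) ∈ fireList g w h) (hS : ∀ p ∈ S, p ∈ fireList g w h) :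
    applyIf (qIg g S (b < h - 1) a (b + 1))
      (applyIf (qIg g S (0 < b) a (b - 1))
        (applyIf (qIg g S (a < w - 1) (a + 1) b)
          (applyIf (qIg g S (0 < a) (a - 1) b)
            (pvSet (rgrid g w h S) a b "X") (a - 1) b)
          (a + 1) b)
        a (b - 1))
      a (b + 1) = rgrid g w h (S ++ [(a, b)]) := by
  obtain ⟨⟨ha0, haw, hb0, hbh⟩, hfire⟩ := mem_fireList.1 hf
  have mkrange : ∀ {G : List (List String)}, GShape g G → ∀ {cx cy : Int},
      inWin w h cx cy → (0 ≤ cx ∧ cx < (G.length : Int) ∧ 0 ≤ cy ∧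
        cy < ((PySem.List.pyGetD G cx []).length : Int)) := by
    intro G hsG cx cy hwin
    obtain ⟨h1, h2, h3, h4⟩ := hwin
    refine ⟨h1, by rw [hsG.1]; omega, h3, ?_⟩
    rw [rowlen_shape hsG cx h1]
    have := hrow cx h1 h2
    omega
  have win1 : qIg g S (0 < a) (a - 1) b → inWin w h (a - 1) b :=
    fun hq => ⟨by have := hq.1; omega, by omega, hb0, hbh⟩
  have win2 : qIg g S (a < w - 1) (a + 1) b → inWin w h (a + 1) b :=
    fun hq => ⟨by omega, by have := hq.1; omega, hb0, hbh⟩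
  have win3 : qIg g S (0 < b) a (b - 1) → inWin w h a (b - 1) :=
    fun hq => ⟨ha0, haw, by have := hq.1; omega, by omega⟩
  have win4 : qIg g S (b < h - 1) a (b + 1) → inWin w h a (b + 1) :=
    fun hq => ⟨ha0, haw, by omega, by have := hq.1; omega⟩
  have hs0 : GShape g (rgrid g w h S) := gshape_rgrid g w h S
  have hlen0 : a < (((rgrid g w h S)).length : Int) := by rw [hs0.1]; omega
  have hrow0 : b < ((PySem.List.pyGetD (rgrid g w h S) a []).length : Int) := by
    rw [rowlen_shape hs0 a ha0]
    have := hrow a ha0 haw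
    omega
  have hs1 : GShape g (pvSet (rgrid g w h S) a b "X") :=
    gshape_pvSet hs0 a b "X" ha0 hlen0
  have hs2 : GShape g (applyIf (qIg g S (0 < a) (a - 1) b)
      (pvSet (rgrid g w h S) a b "X") (a - 1) b) :=
    gshape_applyIf hs1 _ _ _ (fun hq => ⟨(mkrange hs1 (win1 hq)).1, (mkrange hs1 (win1 hq)).2.1⟩)
  have hs3 : GShape g (applyIf (qIg g S (a < w - 1) (a + 1) b)
      (applyIf (qIg g S (0 < a) (a - 1) b)
        (pvSet (rgrid g w h S) a b "X") (a - 1) b) (a + 1) b) :=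
    gshape_applyIf hs2 _ _ _ (fun hq => ⟨(mkrange hs2 (win2 hq)).1, (mkrange hs2 (win2 hq)).2.1⟩)
  have hs4 : GShape g (applyIf (qIg g S (0 < b) a (b - 1))
      (applyIf (qIg g S (a < w - 1) (a + 1) b)
        (applyIf (qIg g S (0 < a) (a - 1) b)
          (pvSet (rgrid g w h S) a b "X") (a - 1) b) (a + 1) b) a (b - 1)) :=
    gshape_applyIf hs3 _ _ _ (fun hq => ⟨(mkrange hs3 (win3 hq)).1, (mkrange hs3 (win3 hq)).2.1⟩)
  have hs5 : GShape g (applyIf (qIg g S (b < h - 1) a (b + 1))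
      (applyIf (qIg g S (0 < b) a (b - 1))
        (applyIf (qIg g S (a < w - 1) (a + 1) b)
          (applyIf (qIg g S (0 < a) (a - 1) b)
            (pvSet (rgrid g w h S) a b "X") (a - 1) b) (a + 1) b) a (b - 1)) a (b + 1)) :=
    gshape_applyIf hs4 _ _ _ (fun hq => ⟨(mkrange hs4 (win4 hq)).1, (mkrange hs4 (win4 hq)).2.1⟩)
  apply grid_ext hs5 (gshape_rgrid g w h (S ++ [(a, b)]))
  intro x y hx hy
  have hx0 : (0 : Int) ≤ (x : Int) := Int.natCast_nonneg x
  have hy0 : (0 : Int) ≤ (y : Int) := Int.natCast_nonneg y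
  rw [pvGet_applyIf _ _ _ _ _ _ (fun hq => mkrange hs4 (win4 hq)) hx0 hy0,
      pvGet_applyIf _ _ _ _ _ _ (fun hq => mkrange hs3 (win3 hq)) hx0 hy0,
      pvGet_applyIf _ _ _ _ _ _ (fun hq => mkrange hs2 (win2 hq)) hx0 hy0,
      pvGet_applyIf _ _ _ _ _ _ (fun hq => mkrange hs1 (win1 hq)) hx0 hy0,
      pvGet_pvSet _ a b "X" _ _ ha0 hlen0 hb0 hrow0 hx0 hy0,
      pvGet_rgrid g w h S x y hx hy,
      pvGet_rgrid g w h (S ++ [(a, b)]) x y hx hy,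
      cellVal_append g w h S a b hf hS (x : Int) (y : Int)]

theorem ignite_char (st : List (List String) × Int) (guard : Bool) (x y : Int) :
    pvIgnite st guard x y =
      if guard = true ∧ pvGet st.1 x y = "#" then (pvSet st.1 x y "@", st.2 + 1) else st := by
  unfold pvIgnite
  split_ifs with h1 h2 h2 <;> simp_all

theorem stepA_step (g : List (List String)) (w h : Int) (S : List (Int × Int))
    (a b : Int) (hw : w ≤ (g.length : Int))
    (hrow : ∀ x : Int, 0 ≤ x → x < w → h ≤ ((PySem.List.pyGetD g x []).length : Int))
    (hf : (a, b) ∈ fireList g w h) (hS : ∀ p ∈ S, p ∈ fireList g w h) :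
    stepA w h (rgrid g w h S, cnt g w h S) (a, b) =
      (rgrid g w h (S ++ [(a, b)]), cnt g w h (S ++ [(a, b)])) := by
  obtain ⟨⟨ha0, haw, hb0, hbh⟩, hfire⟩ := mem_fireList.1 hf
  have hSat : ∀ p ∈ S, pvGet g p.1 p.2 = "@" := by
    intro p hp
    obtain ⟨px, py⟩ := p
    exact (mem_fireList.1 (hS _ hp)).2
  have mkrange : ∀ {G : List (List String)}, GShape g G → ∀ {cx cy : Int},
      inWin w h cx cy → (0 ≤ cx ∧ cx < (G.length : Int) ∧ 0 ≤ cy ∧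
        cy < ((PySem.List.pyGetD G cx []).length : Int)) := by
    intro G hsG cx cy hwin
    obtain ⟨h1, h2, h3, h4⟩ := hwin
    refine ⟨h1, by rw [hsG.1]; omega, h3, ?_⟩
    rw [rowlen_shape hsG cx h1]
    have := hrow cx h1 h2
    omega
  have win1 : qIg g S (0 < a) (a - 1) b → inWin w h (a - 1) b :=
    fun hq => ⟨by have := hq.1; omega, by omega, hb0, hbh⟩
  have win2 : qIg g S (a < w - 1) (a + 1) b → inWin w h (a + 1) b :=
    fun hq => ⟨by omega, by have := hq.1; omega, hb0, hbh⟩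
  have win3 : qIg g S (0 < b) a (b - 1) → inWin w h a (b - 1) :=
    fun hq => ⟨ha0, haw, by have := hq.1; omega, by omega⟩
  have hs0 : GShape g (rgrid g w h S) := gshape_rgrid g w h S
  have hlen0 : a < (((rgrid g w h S)).length : Int) := by rw [hs0.1]; omega
  have hrow0 : b < ((PySem.List.pyGetD (rgrid g w h S) a []).length : Int) := by
    rw [rowlen_shape hs0 a ha0]
    have := hrow a ha0 haw
    omega
  have hs1 : GShape g (pvSet (rgrid g w h S) a b "X") :=
    gshape_pvSet hs0 a b "X" ha0 hlen0
  have hs2 : GShape g (applyIf (qIg g S (0 < a) (a - 1) b)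
      (pvSet (rgrid g w h S) a b "X") (a - 1) b) :=
    gshape_applyIf hs1 _ _ _ (fun hq => ⟨(mkrange hs1 (win1 hq)).1, (mkrange hs1 (win1 hq)).2.1⟩)
  have hs3 : GShape g (applyIf (qIg g S (a < w - 1) (a + 1) b)
      (applyIf (qIg g S (0 < a) (a - 1) b)
        (pvSet (rgrid g w h S) a b "X") (a - 1) b) (a + 1) b) :=
    gshape_applyIf hs2 _ _ _ (fun hq => ⟨(mkrange hs2 (win2 hq)).1, (mkrange hs2 (win2 hq)).2.1⟩)
  have hcv : ∀ {cx cy : Int}, inWin w h cx cy →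
      (cellVal g w h S cx cy = "#" ↔ pvGet g cx cy = "#" ∧ ¬ nbrIn S cx cy) :=
    fun hwin => cellVal_eq_hash hSat hwin
  have hread1 : 0 < a → pvGet (pvSet (rgrid g w h S) a b "X") (a - 1) b
      = cellVal g w h S (a - 1) b := by
    intro hg
    rw [pvGet_pvSet _ a b "X" _ _ ha0 hlen0 hb0 hrow0 (by omega) hb0,
        if_neg (by rintro ⟨hxx, -⟩; omega)]
    exact pvGet_rgrid' g w h S (by omega) (by omega) hb0
      (by rw [rowlen_int g (a - 1) (by omega)]
          have := hrow (a - 1) (by omega) (by omega)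
          omega)
  have hread2 : a < w - 1 → pvGet (applyIf (qIg g S (0 < a) (a - 1) b)
        (pvSet (rgrid g w h S) a b "X") (a - 1) b) (a + 1) b
      = cellVal g w h S (a + 1) b := by
    intro hg
    rw [pvGet_applyIf _ _ _ _ _ _ (fun hq => mkrange hs1 (win1 hq)) (by omega) hb0,
        if_neg (by rintro ⟨-, hxx, -⟩; omega),
        pvGet_pvSet _ a b "X" _ _ ha0 hlen0 hb0 hrow0 (by omega) hb0,
        if_neg (by rintro ⟨hxx, -⟩; omega)]
    exact pvGet_rgrid' g w h S (by omega) (by omega) hb0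
      (by rw [rowlen_int g (a + 1) (by omega)]
          have := hrow (a + 1) (by omega) (by omega)
          omega)
  have hread3 : 0 < b → pvGet (applyIf (qIg g S (a < w - 1) (a + 1) b)
        (applyIf (qIg g S (0 < a) (a - 1) b)
          (pvSet (rgrid g w h S) a b "X") (a - 1) b) (a + 1) b) a (b - 1)
      = cellVal g w h S a (b - 1) := by
    intro hg
    rw [pvGet_applyIf _ _ _ _ _ _ (fun hq => mkrange hs2 (win2 hq)) ha0 (by omega),
        if_neg (by rintro ⟨-, hxx, -⟩; omega),
        pvGet_applyIf _ _ _ _ _ _ (fun hq => mkrange hs1 (win1 hq)) ha0 (by omega),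
        if_neg (by rintro ⟨-, hxx, -⟩; omega),
        pvGet_pvSet _ a b "X" _ _ ha0 hlen0 hb0 hrow0 ha0 (by omega),
        if_neg (by rintro ⟨-, hyy⟩; omega)]
    exact pvGet_rgrid' g w h S ha0 (by omega) (by omega)
      (by rw [rowlen_int g a ha0]
          have := hrow a ha0 haw
          omega)
  have hread4 : b < h - 1 → pvGet (applyIf (qIg g S (0 < b) a (b - 1))
        (applyIf (qIg g S (a < w - 1) (a + 1) b)
          (applyIf (qIg g S (0 < a) (a - 1) b)
            (pvSet (rgrid g w h S) a b "X") (a - 1) b) (a + 1) b) a (b - 1)) a (b + 1)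
      = cellVal g w h S a (b + 1) := by
    intro hg
    rw [pvGet_applyIf _ _ _ _ _ _ (fun hq => mkrange hs3 (win3 hq)) ha0 (by omega),
        if_neg (by rintro ⟨-, -, hyy⟩; omega),
        pvGet_applyIf _ _ _ _ _ _ (fun hq => mkrange hs2 (win2 hq)) ha0 (by omega),
        if_neg (by rintro ⟨-, hxx, -⟩; omega),
        pvGet_applyIf _ _ _ _ _ _ (fun hq => mkrange hs1 (win1 hq)) ha0 (by omega),
        if_neg (by rintro ⟨-, hxx, -⟩; omega),
        pvGet_pvSet _ a b "X" _ _ ha0 hlen0 hb0 hrow0 ha0 (by omega),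
        if_neg (by rintro ⟨-, hyy⟩; omega)]
    exact pvGet_rgrid' g w h S ha0 (by omega) (by omega)
      (by rw [rowlen_int g a ha0]
          have := hrow a ha0 haw
          omega)
  have h1 : ∀ c : Int, pvIgnite (pvSet (rgrid g w h S) a b "X", c) (decide (a > 0)) (a - 1) b
      = (applyIf (qIg g S (0 < a) (a - 1) b) (pvSet (rgrid g w h S) a b "X") (a - 1) b,
         c + (if qIg g S (0 < a) (a - 1) b then 1 else 0)) := by
    intro c
    rw [ignite_char]
    by_cases hq : qIg g S (0 < a) (a - 1) b
    · rw [if_pos ⟨by simpa using hq.1, by rw [hread1 hq.1]; exact (hcv (win1 hq)).2 ⟨hq.2.1, hq.2.2⟩⟩]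
      unfold applyIf
      rw [if_pos hq, if_pos hq]
    · rw [if_neg (by
        rintro ⟨hgd, hrd⟩
        have hg : 0 < a := by simpa using hgd
        rw [hread1 hg] at hrd
        have := (hcv ⟨by omega, by omega, hb0, hbh⟩).1 hrd
        exact hq ⟨hg, this.1, this.2⟩)]
      unfold applyIf
      rw [if_neg hq, if_neg hq, add_zero]
  have h2 : ∀ c : Int, pvIgnite (applyIf (qIg g S (0 < a) (a - 1) b)
        (pvSet (rgrid g w h S) a b "X") (a - 1) b, c) (decide (a < w - 1)) (a + 1) b
      = (applyIf (qIg g S (a < w - 1) (a + 1) b)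
          (applyIf (qIg g S (0 < a) (a - 1) b)
            (pvSet (rgrid g w h S) a b "X") (a - 1) b) (a + 1) b,
         c + (if qIg g S (a < w - 1) (a + 1) b then 1 else 0)) := by
    intro c
    rw [ignite_char]
    by_cases hq : qIg g S (a < w - 1) (a + 1) b
    · rw [if_pos ⟨by simpa using hq.1, by rw [hread2 hq.1]; exact (hcv (win2 hq)).2 ⟨hq.2.1, hq.2.2⟩⟩]
      unfold applyIf
      rw [if_pos hq, if_pos hq]
    · rw [if_neg (by
        rintro ⟨hgd, hrd⟩
        have hg : a < w - 1 := by simpa using hgd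
        rw [hread2 hg] at hrd
        have := (hcv ⟨by omega, by omega, hb0, hbh⟩).1 hrd
        exact hq ⟨hg, this.1, this.2⟩)]
      unfold applyIf
      rw [if_neg hq, if_neg hq, add_zero]
  have h3 : ∀ c : Int, pvIgnite (applyIf (qIg g S (a < w - 1) (a + 1) b)
        (applyIf (qIg g S (0 < a) (a - 1) b)
          (pvSet (rgrid g w h S) a b "X") (a - 1) b) (a + 1) b, c) (decide (b > 0)) a (b - 1)
      = (applyIf (qIg g S (0 < b) a (b - 1))
          (applyIf (qIg g S (a < w - 1) (a + 1) b)
            (applyIf (qIg g S (0 < a) (a - 1) b)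
              (pvSet (rgrid g w h S) a b "X") (a - 1) b) (a + 1) b) a (b - 1),
         c + (if qIg g S (0 < b) a (b - 1) then 1 else 0)) := by
    intro c
    rw [ignite_char]
    by_cases hq : qIg g S (0 < b) a (b - 1)
    · rw [if_pos ⟨by simpa using hq.1, by rw [hread3 hq.1]; exact (hcv (win3 hq)).2 ⟨hq.2.1, hq.2.2⟩⟩]
      unfold applyIf
      rw [if_pos hq, if_pos hq]
    · rw [if_neg (by
        rintro ⟨hgd, hrd⟩
        have hg : 0 < b := by simpa using hgd
        rw [hread3 hg] at hrd
        have := (hcv ⟨ha0, haw, by omega, by omega⟩).1 hrd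
        exact hq ⟨hg, this.1, this.2⟩)]
      unfold applyIf
      rw [if_neg hq, if_neg hq, add_zero]
  have h4 : ∀ c : Int, pvIgnite (applyIf (qIg g S (0 < b) a (b - 1))
        (applyIf (qIg g S (a < w - 1) (a + 1) b)
          (applyIf (qIg g S (0 < a) (a - 1) b)
            (pvSet (rgrid g w h S) a b "X") (a - 1) b) (a + 1) b) a (b - 1), c)
        (decide (b < h - 1)) a (b + 1)
      = (applyIf (qIg g S (b < h - 1) a (b + 1))
          (applyIf (qIg g S (0 < b) a (b - 1))
            (applyIf (qIg g S (a < w - 1) (a + 1) b)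
              (applyIf (qIg g S (0 < a) (a - 1) b)
                (pvSet (rgrid g w h S) a b "X") (a - 1) b) (a + 1) b) a (b - 1)) a (b + 1),
         c + (if qIg g S (b < h - 1) a (b + 1) then 1 else 0)) := by
    intro c
    rw [ignite_char]
    by_cases hq : qIg g S (b < h - 1) a (b + 1)
    · rw [if_pos ⟨by simpa using hq.1, by rw [hread4 hq.1]; exact (hcv ⟨ha0, haw, by omega, by have := hq.1; omega⟩).2 ⟨hq.2.1, hq.2.2⟩⟩]
      unfold applyIf
      rw [if_pos hq, if_pos hq]
    · rw [if_neg (by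
        rintro ⟨hgd, hrd⟩
        have hg : b < h - 1 := by simpa using hgd
        rw [hread4 hg] at hrd
        have := (hcv ⟨ha0, haw, by omega, by omega⟩).1 hrd
        exact hq ⟨hg, this.1, this.2⟩)]
      unfold applyIf
      rw [if_neg hq, if_neg hq, add_zero]
  simp only [stepA]
  rw [h1, h2, h3, h4]
  refine Prod.ext ?_ ?_
  · exact grid_final g w h S a b hw hrow hf hS
  · show _ = cnt g w h (S ++ [(a, b)])
    rw [cnt_append g w h S a b hf hS]
    ring

-- ===== main fold =====

theorem foldl_steps (g : List (List String)) (w h : Int)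
    (hw : w ≤ (g.length : Int))
    (hrow : ∀ x : Int, 0 ≤ x → x < w → h ≤ ((PySem.List.pyGetD g x []).length : Int)) :
    ∀ (rest done : List (Int × Int)), fireList g w h = done ++ rest →
      rest.foldl (stepA w h) (rgrid g w h done, cnt g w h done) =
        (rgrid g w h (fireList g w h), cnt g w h (fireList g w h)) := by
  intro rest
  induction rest with
  | nil => intro done hsplit; rw [List.foldl_nil, hsplit, List.append_nil]
  | cons f rest ih =>
    intro done hsplit
    obtain ⟨a, b⟩ := f
    have hnd := nodup_fireList g w h
    rw [hsplit] at hnd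
    have hfmem : (a, b) ∈ fireList g w h := by
      rw [hsplit]; exact List.mem_append_right _ List.mem_cons_self
    have hdone : ∀ p ∈ done, p ∈ fireList g w h := by
      intro p hp; rw [hsplit]; exact List.mem_append_left _ hp
    rw [List.foldl_cons, stepA_step g w h done a b hw hrow hfmem hdone]
    exact ih (done ++ [(a, b)]) (by rw [hsplit]; simp)

-- ===== B computes (rgrid F, cnt F) =====

theorem mem_altFires (g : List (List String)) (w h : Int) (p : Int × Int) :
    (p ∈ altFires g w h) = (p ∈ fireList g w h) :=
  propext (PySem.Set.mem_ofList _ p)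

theorem altNewCell_pvGet (g : List (List String)) (w h : Int) {x y : Int}
    (hx0 : 0 ≤ x) (hy0 : 0 ≤ y) :
    altNewCell w h (altFires g w h) x y (pvGet g x y) =
      cellVal g w h (fireList g w h) x y := by
  unfold altNewCell cellVal
  by_cases hb : w ≤ x ∨ h ≤ y
  · have h1 : ¬ ((x, y) ∈ fireList g w h) := by
      intro hmem
      have := (mem_fireList.1 hmem).1
      unfold inWin at this
      omega
    have h2 : ¬ (inWin w h x y ∧ pvGet g x y = "#" ∧ nbrIn (fireList g w h) x y) := by
      rintro ⟨hwin, -⟩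
      unfold inWin at hwin
      omega
    rw [if_pos hb, if_neg h1, if_neg h2]
  · push Not at hb
    rw [if_neg (by push Not; exact hb)]
    by_cases hfm : (x, y) ∈ fireList g w h
    · rw [if_pos (by rw [mem_altFires]; exact hfm), if_pos hfm]
    · rw [if_neg (by rw [mem_altFires]; exact hfm), if_neg hfm]
      have hwin : inWin w h x y := ⟨hx0, hb.1, hy0, hb.2⟩
      by_cases hig : pvGet g x y = "#" ∧ nbrIn (fireList g w h) x y
      · rw [if_pos ⟨hig.1, by
            have := hig.2
            unfold nbrIn at this
            simpa only [mem_altFires] using this⟩,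
          if_pos ⟨hwin, hig⟩]
      · rw [if_neg (by
            rintro ⟨hc1, hc2⟩
            exact hig ⟨hc1, by unfold nbrIn; simpa only [mem_altFires] using hc2⟩),
          if_neg (by rintro ⟨-, hcc⟩; exact hig hcc)]

theorem alt_eq (g : List (List String)) (w h : Int) :
    burn_cycle_alt g w h =
      (rgrid g w h (fireList g w h), cnt g w h (fireList g w h)) := by
  unfold burn_cycle_alt
  refine Prod.ext ?_ ?_
  · apply grid_ext (gshape_emap g _) (gshape_rgrid g w h _)
    intro x y hx hy
    rw [pvGet_emap g _ x y hx hy, pvGet_rgrid g w h _ x y hx hy]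
    have hc : (g.getD x []).getD y "" = pvGet g (x : Int) (y : Int) :=
      (pvGet_natCast g x y).symm
    rw [hc]
    exact altNewCell_pvGet g w h (by positivity) (by positivity)
  · show (PySem.List.pyRange 0 w 1).foldl _ 0 = _
    have hinner : ∀ (acc : Int) (x : Int),
        (PySem.List.pyRange 0 h 1).foldl (fun a y =>
          if pvGet g x y = "#" ∧ ((x - 1, y) ∈ altFires g w h ∨ (x + 1, y) ∈ altFires g w h ∨
              (x, y - 1) ∈ altFires g w h ∨ (x, y + 1) ∈ altFires g w h) then a + 1 else a) acc
        = acc + (((PySem.List.pyRange 0 h 1).countP (fun y =>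
            decide (pvGet g x y = "#" ∧ nbrIn (fireList g w h) x y)) : Nat) : Int) := by
      intro acc x
      rw [PySem.List.foldl_ite_add_one]
      congr 2
      apply List.countP_congr
      intro y _
      simp only [mem_altFires]
    rw [PySem.List.foldl_congr_mem _ _ (fun acc x => acc +
      (((PySem.List.pyRange 0 h 1).countP (fun y =>
        decide (pvGet g x y = "#" ∧ nbrIn (fireList g w h) x y)) : Nat) : Int)) _
      (fun acc x _ => hinner acc x), PySem.List.foldl_add, zero_add]
    unfold cnt allPairs
    rw [countP_product, Nat.cast_list_sum, List.map_map]
    rfl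

-- ===== VERDICT (by name: the statement is the Claim_ definition above) =====
theorem burn_cycle_spec : Claim_equal_burn_cycle := by
  intro g w h _hdom hpre
  unfold Spec_burn_cycle
  rw [alt_eq]
  show (List.foldl (stepA w h) (g, 0) _) = _
  rw [onfire_eq]
  rcases hpre with hdeg | ⟨hw, hrow⟩
  · have hF : fireList g w h = [] := by
      rcases hdeg with hw0 | hh0
      · unfold fireList
        rw [PySem.List.pyRange_one_eq_nil hw0]
        rfl
      · unfold fireList
        rw [PySem.List.pyRange_one_eq_nil hh0]
        simp
    rw [hF, List.foldl_nil, rgrid_nil, cnt_nil]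
  · have hrow' : ∀ x : Int, 0 ≤ x → x < w →
        h ≤ ((PySem.List.pyGetD g x []).length : Int) := by
      intro x hx0 hxw
      have hxg : x.toNat < g.length := by omega
      have hmem : g[x.toNat] ∈ g.take w.toNat := by
        have hxw' : x.toNat < (g.take w.toNat).length := by
          simp [List.length_take]; omega
        have := List.getElem_mem hxw'
        rwa [List.getElem_take] at this
      have := hrow _ hmem
      have ex : x = ((x.toNat : Nat) : Int) := by omega
      rw [ex, PySem.List.pyGetD_natCast, List.getD_eq_getElem _ _ hxg]
      exact this
    have := foldl_steps g w h hw hrow' (fireList g w h) [] (by simp)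
    rw [rgrid_nil, cnt_nil] at this
    exact this
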